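-- pv_equiv track=rewrite | github.com/YoonSungLee/Algorithm_python | programmers-코딩테스트 고득점 Kit/level_01/모의고사.py | solution
-- ===== SOURCE A (Python) =====
-- def solution(answers):
--     result = [[1, 0], [2, 0], [3, 0]]   # result = [0, 0, 0]
--     one = [1, 2, 3, 4, 5]
--     two = [2, 1, 2, 3, 2, 4, 2, 5]
--     three = [3, 3, 1, 1, 2, 2, 4, 4, 5, 5]
--
--     for idx, answer in enumerate(answers):
--         if answer == one[idx % 5]:
--             result[0][1] += 1
--         if answer == two[idx % 8]:
--             result[1][1] += 1
--         if answer == three[idx % 10]: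
--             result[2][1] += 1
--
--     max_val = max(result[0][1], result[1][1], result[2][1]) # max_val = max(result)
--     answer = [i[0] for i in result if i[1] == max_val]
--     answer.sort()
--     return answer
-- ===== SOURCE B (Python) =====
-- def solution(answers):
--     patterns = [[1, 2, 3, 4, 5], [2, 1, 2, 3, 2, 4, 2, 5], [3, 3, 1, 1, 2, 2, 4, 4, 5, 5]]
--     scores = []
--     for p in patterns:
--         L = len(p)
--         scores.append(sum(answers[j::L].count(v) for j, v in enumerate(p)))
--     best = max(scores)
--     return [n for n, s in zip((1, 2, 3), scores) if s == best]
-- ===== Notes on version B (the rewrite author's own statement) =====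
-- stated objective: alternative
-- what changed: A makes one interleaved left-to-right pass over answers, mutating three counters via pattern[idx % len] lookups and sorting the winners; B never walks answers element-by-element against a cyclic index: it scores each pattern by residue class, counting occurrences of p[j] in the stride slice answers[j::len(p)], and emits the winners in label order without a sort.
import Mathlib
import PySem

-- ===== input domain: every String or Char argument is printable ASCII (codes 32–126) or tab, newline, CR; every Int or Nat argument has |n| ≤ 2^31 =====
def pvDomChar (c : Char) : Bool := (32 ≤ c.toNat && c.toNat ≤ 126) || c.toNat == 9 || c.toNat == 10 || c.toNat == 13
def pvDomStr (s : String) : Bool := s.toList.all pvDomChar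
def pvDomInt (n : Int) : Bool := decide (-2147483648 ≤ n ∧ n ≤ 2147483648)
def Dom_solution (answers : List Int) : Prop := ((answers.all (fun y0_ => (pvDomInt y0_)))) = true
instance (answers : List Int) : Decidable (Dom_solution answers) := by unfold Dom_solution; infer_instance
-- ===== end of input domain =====

-- B scores each pattern over its residue-class stride slices (answers[j::L].count(p[j]))
-- instead of A's per-element pass with modular pattern lookups (objective: alternative).

-- ===== PORT A =====
-- A's per-element step: the three interleaved 'if answer == pattern[idx % len]: counter += 1' updates on one triple of counters
def aStep (r : Int × Int × Int) (q : Int × Int) : Int × Int × Int :=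
  let r := if some q.2 == PySem.List.pyGet? ([1, 2, 3, 4, 5] : List Int) (PySem.Int.mod q.1 5) then (r.1 + 1, r.2.1, r.2.2) else r
  let r := if some q.2 == PySem.List.pyGet? ([2, 1, 2, 3, 2, 4, 2, 5] : List Int) (PySem.Int.mod q.1 8) then (r.1, r.2.1 + 1, r.2.2) else r
  if some q.2 == PySem.List.pyGet? ([3, 3, 1, 1, 2, 2, 4, 4, 5, 5] : List Int) (PySem.Int.mod q.1 10) then (r.1, r.2.1, r.2.2 + 1) else r

def solution (answers : List Int) : List Int :=
  -- result = [[1,0],[2,0],[3,0]]: the three counters, kept as a triple since only result[i][1] is ever mutated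
  let result := (PySem.List.enumerate answers 0).foldl aStep (0, 0, 0)
  let maxVal := max (max result.1 result.2.1) result.2.2
  let ans := (([(1, result.1), (2, result.2.1), (3, result.2.2)] : List (Int × Int)).filter
      (fun i => i.2 == maxVal)).map (fun i => i.1)
  PySem.List.sorted ans (fun x => x)   -- answer.sort()

-- ===== PORT B =====
-- B's inner generator: sum(answers[j::L].count(v) for j, v in enumerate(p)).
-- The slice step is len(p) ∈ {5,8,10}, never 0, so slice? is always some; '.getD []' is unreachable.
def patScore (answers : List Int) (p : List Int) : Int :=
  ((PySem.List.enumerate p 0).map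
    (fun jv => (((PySem.List.slice? answers (some jv.1) none (p.length : Int)).getD []).count jv.2 : Int))).sum

def solution_alt (answers : List Int) : List Int :=
  let patterns : List (List Int) := [[1, 2, 3, 4, 5], [2, 1, 2, 3, 2, 4, 2, 5], [3, 3, 1, 1, 2, 2, 4, 4, 5, 5]]
  let scores := patterns.map (patScore answers)
  let best := (PySem.List.max? scores (fun x => x)).getD 0   -- max(scores): scores has 3 elements, never raises
  ((List.zip ([1, 2, 3] : List Int) scores).filter (fun ns => ns.2 == best)).map (fun ns => ns.1)

-- ===== PRECONDITION & SPEC =====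
def Spec_solution (answers : List Int) (out : List Int) : Prop := out = solution_alt answers
instance (answers : List Int) (out : List Int) : Decidable (Spec_solution answers out) := by unfold Spec_solution; infer_instance

-- ===== CLAIM (what is proved, stated in full; the proofs are below) =====
def Claim_equal_solution : Prop := ∀ (answers : List Int), Dom_solution answers → Spec_solution answers (solution answers)

-- ===== LEMMAS AND PROOFS =====

-- ---- shared yardstick: match-count with a rotating pattern ----
def rotCount : List Int → List Int → Int
  | _, [] => 0
  | p, x :: xs => (if x = p.headD 0 then 1 else 0) + rotCount (p.tail ++ p.take 1) xs

-- ---- A side: the interleaved foldl splits into three independent counts ----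
def cnt (pat : List Int) (m : Int) (l : List (Int × Int)) : Int :=
  ((l.filter (fun q => some q.2 == PySem.List.pyGet? pat (PySem.Int.mod q.1 m))).map (fun _ => (1 : Int))).sum

theorem cnt_cons (pat : List Int) (m : Int) (x : Int × Int) (l : List (Int × Int)) :
    cnt pat m (x :: l) =
      (if some x.2 == PySem.List.pyGet? pat (PySem.Int.mod x.1 m) then 1 else 0) + cnt pat m l := by
  simp only [cnt, List.filter_cons]
  split <;> simp

theorem foldl_aStep (l : List (Int × Int)) (a b c : Int) :
    l.foldl aStep (a, b, c) =
      (a + cnt [1, 2, 3, 4, 5] 5 l, b + cnt [2, 1, 2, 3, 2, 4, 2, 5] 8 l,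
       c + cnt [3, 3, 1, 1, 2, 2, 4, 4, 5, 5] 10 l) := by
  induction l generalizing a b c with
  | nil => simp [cnt]
  | cons x xs ih =>
    rw [List.foldl_cons, cnt_cons, cnt_cons, cnt_cons]
    simp only [aStep]
    split_ifs <;> rw [ih] <;> simp only [*, Prod.mk.injEq] <;> refine ⟨by ring, by ring, by ring⟩

-- A's count from start index t is rotCount on the pattern rotated by t % L
theorem cnt_rot (xs : List Int) : ∀ (t : Nat) (p : List Int), p ≠ [] →
    cnt p (p.length : Int) (PySem.List.enumerate xs (t : Int)) =
      rotCount (p.drop (t % p.length) ++ p.take (t % p.length)) xs := by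
  induction xs with
  | nil => intro t p hp; simp [cnt, rotCount, PySem.List.enumerate]
  | cons x xs ih =>
    intro t p hp
    have hL : 0 < p.length := List.length_pos_of_ne_nil hp
    set r := t % p.length with hr
    have hrL : r < p.length := Nat.mod_lt _ hL
    have hdrop : p.drop r = p[r] :: p.drop (r + 1) := List.drop_eq_getElem_cons hrL
    have henum : ((t : Int) + 1) = (((t + 1 : Nat)) : Int) := by push_cast; ring
    rw [PySem.List.enumerate_cons, cnt_cons, henum, ih (t + 1) p hp]
    have hcond : (some x == PySem.List.pyGet? p (PySem.Int.mod (t : Int) (p.length : Int)))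
        = (x == p[r]) := by
      rw [PySem.Int.mod_natCast, PySem.List.pyGet?_natCast, ← hr,
        List.getElem?_eq_getElem hrL, Option.some_beq_some]
    have hhead : (p.drop r ++ p.take r).headD 0 = p[r] := by
      rw [hdrop]; simp only [List.cons_append, List.headD_cons]
    have hrot : (p.drop r ++ p.take r).tail ++ (p.drop r ++ p.take r).take 1
        = p.drop ((t + 1) % p.length) ++ p.take ((t + 1) % p.length) := by
      have hmod : (t + 1) % p.length = (r + 1) % p.length := by
        conv_lhs => rw [← Nat.mod_add_mod]
      rw [hdrop]
      simp only [List.cons_append, List.tail_cons, List.take_succ_cons, List.take_zero]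
      by_cases hcase : r + 1 < p.length
      · rw [hmod, Nat.mod_eq_of_lt hcase, List.take_succ, List.getElem?_eq_getElem hrL]
        simp [List.append_assoc]
      · have hrl : r + 1 = p.length := by omega
        have hz : (r + 1) % p.length = 0 := by rw [hrl]; exact Nat.mod_self _
        rw [hmod, hz, List.drop_zero, List.take_zero, List.append_nil]
        have hd : p.drop (r + 1) = [] := List.drop_eq_nil_of_le (by omega)
        have ht : p.take r ++ [p[r]] = p.take (r + 1) := by
          rw [List.take_succ, List.getElem?_eq_getElem hrL]; simp
        rw [hd, List.nil_append, ht, hrl, List.take_length]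
    rw [rotCount, hcond, hhead, hrot]
    simp [beq_iff_eq]

-- ---- B side: per-offset stride counts ----
def cJ (xs : List Int) (j L : Nat) (v : Int) : Int :=
  (((PySem.List.slice? xs (some (j : Int)) none (L : Int)).getD []).count v : Int)

theorem slice_stride (xs : List Int) (j L : Nat) (hL : 0 < L) :
    (PySem.List.slice? xs (some (j:Int)) none (L:Int)).getD [] =
      if h : j < xs.length then
        xs[j] :: (PySem.List.slice? xs (some ((j+L : Nat):Int)) none (L:Int)).getD []
      else [] := by
  have hL0 : ((L:Int) = 0) = False := by simp; omega
  have hLneg : ((L:Int) < 0) = False := by simp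
  have hLpos : (0 < (L:Int)) = True := by simp; omega
  have hjneg : (((j:Int)) < 0) = False := by simp
  have hjLneg : ((((j+L:Nat):Int)) < 0) = False := by simp; omega
  simp only [PySem.List.slice?, PySem.List.sliceIndices, hL0, hLneg, hLpos, hjneg, hjLneg,
    if_false, if_true, Option.getD_some]
  by_cases h : j < xs.length
  · rw [dif_pos h]
    have hmin : min (j:Int) (xs.length:Int) = (j:Int) := by omega
    have hc : (((xs.length:Int) - (j:Int) + (L:Int) - 1) / (L:Int)).toNat
        = (xs.length - j - 1) / L + 1 := by
      have h1 : ((xs.length:Int) - (j:Int) + (L:Int) - 1) = ((xs.length - j - 1 + L : Nat) : Int) := by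
        push_cast; omega
      rw [h1, ← Int.natCast_ediv, Int.toNat_natCast]
      have h2 : xs.length - j - 1 + L = (xs.length - j - 1) + 1 * L := by ring
      rw [h2, Nat.add_mul_div_right _ _ hL]
    rw [hmin, if_pos (by omega : (j:Int) < (xs.length:Int)), hc,
      List.range_succ_eq_map, List.filterMap_cons, List.filterMap_map]
    have h0 : xs[((j:Int) + (L:Int) * ((0:Nat):Int)).toNat]? = some xs[j] := by simp
    rw [h0]
    show xs[j] :: _ = xs[j] :: _
    congr 1
    by_cases h2 : j + L < xs.length
    · have hmin2 : min ((j+L:Nat):Int) (xs.length:Int) = ((j+L:Nat):Int) := by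
        push_cast; omega
      rw [hmin2, if_pos (by push_cast; omega : ((j+L:Nat):Int) < (xs.length:Int))]
      have hc2 : (((xs.length:Int) - ((j+L:Nat):Int) + (L:Int) - 1) / (L:Int)).toNat
          = (xs.length - j - 1) / L := by
        have h1 : ((xs.length:Int) - ((j+L:Nat):Int) + (L:Int) - 1) = ((xs.length - j - 1 : Nat) : Int) := by
          push_cast; omega
        rw [h1, ← Int.natCast_ediv, Int.toNat_natCast]
      rw [hc2]
      apply List.filterMap_congr
      intro k _
      simp only [Function.comp]
      congr 2
      push_cast
      ring
    · have hmin2 : min ((j+L:Nat):Int) (xs.length:Int) = (xs.length:Int) := by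
        push_cast; omega
      rw [hmin2, if_neg (by omega : ¬ ((xs.length:Int) < (xs.length:Int)))]
      have hz : (xs.length - j - 1) / L = 0 := Nat.div_eq_of_lt (by omega)
      rw [hz]
      simp
  · rw [dif_neg h]
    have hmin : min (j:Int) (xs.length:Int) = (xs.length:Int) := by omega
    rw [hmin, if_neg (by omega : ¬ ((xs.length:Int) < (xs.length:Int)))]
    simp

theorem cJ_rec (xs : List Int) (j L : Nat) (v : Int) (hL : 0 < L) :
    cJ xs j L v = if h : j < xs.length then
        (if xs[j] = v then 1 else 0) + cJ xs (j + L) L v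
      else 0 := by
  rw [cJ, slice_stride xs j L hL]
  split
  · rw [List.count_cons, cJ]
    push_cast
    split_ifs with h1 h2 h2 <;> simp_all [beq_iff_eq] <;> ring
  · simp

theorem cJ_nil (j L : Nat) (v : Int) (hL : 0 < L) : cJ [] j L v = 0 := by
  rw [cJ_rec [] j L v hL]; simp

theorem cJ_shift (L : Nat) (hL : 0 < L) :
    ∀ (m : Nat) (xs : List Int) (j : Nat) (v x : Int), xs.length - j ≤ m →
      cJ (x :: xs) (j + 1) L v = cJ xs j L v := by
  intro m
  induction m with
  | zero =>
    intro xs j v x hm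
    rw [cJ_rec (x :: xs) (j + 1) L v hL, cJ_rec xs j L v hL]
    rw [dif_neg (by simp; omega), dif_neg (by omega)]
  | succ m ih =>
    intro xs j v x hm
    rw [cJ_rec (x :: xs) (j + 1) L v hL, cJ_rec xs j L v hL]
    by_cases h : j < xs.length
    · rw [dif_pos (show j + 1 < (x :: xs).length by simp; omega), dif_pos h]
      have hget : (x :: xs)[j + 1]'(by simp; omega) = xs[j] := by simp
      rw [hget]
      have harr : j + 1 + L = (j + L) + 1 := by ring
      rw [harr, ih xs (j + L) v x (by omega)]
    · rw [dif_neg (show ¬ j + 1 < (x :: xs).length by simp; omega), dif_neg h]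

theorem cJ_zero (xs : List Int) (L : Nat) (v x : Int) (hL : 0 < L) :
    cJ (x :: xs) 0 L v = (if x = v then 1 else 0) + cJ xs (L - 1) L v := by
  rw [cJ_rec _ _ _ _ hL, dif_pos (by simp)]
  have h0 : (x :: xs)[0] = x := rfl
  have hL1 : (0 : Nat) + L = (L - 1) + 1 := by omega
  rw [h0, hL1, cJ_shift L hL (xs.length) xs (L - 1) v x (by omega)]

-- sum of the per-offset stride counts, over all offsets of pattern p
def sumJ (xs p : List Int) : Int :=
  ((List.range p.length).map (fun j => cJ xs j p.length (p.getD j 0))).sum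

theorem sumJ_rot (xs : List Int) : ∀ (p : List Int), p ≠ [] → sumJ xs p = rotCount p xs := by
  induction xs with
  | nil =>
    intro p hp
    have hL : 0 < p.length := List.length_pos_of_ne_nil hp
    simp only [sumJ, rotCount]
    rw [List.map_congr_left (fun j _ => cJ_nil j p.length (p.getD j 0) hL)]
    simp
  | cons x xs ih =>
    intro p hp
    obtain ⟨a, t, rfl⟩ := List.exists_cons_of_ne_nil hp
    have hL : (a :: t).length = t.length + 1 := by simp
    -- left side: split off offset 0, shift the rest down by one
    have lhs_eq : sumJ (x :: xs) (a :: t) =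
        ((if x = a then 1 else 0) + cJ xs t.length (t.length + 1) a)
          + ((List.range t.length).map (fun j => cJ xs j (t.length + 1) (t.getD j 0))).sum := by
      simp only [sumJ, hL, List.range_succ_eq_map, List.map_cons, List.map_map, List.sum_cons]
      rw [cJ_zero xs (t.length + 1) ((a :: t).getD 0 0) x (by omega)]
      have hmap : (List.range t.length).map ((fun j => cJ (x :: xs) j (t.length + 1) ((a :: t).getD j 0)) ∘ Nat.succ)
          = (List.range t.length).map (fun j => cJ xs j (t.length + 1) (t.getD j 0)) := by
        apply List.map_congr_left
        intro j hj
        simp only [Function.comp, Nat.succ_eq_add_one, List.getD_cons_succ]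
        exact cJ_shift (t.length + 1) (by omega) xs.length xs j (t.getD j 0) x (by omega)
      rw [hmap]
      simp
    -- right side: IH on the rotated pattern, whose sum splits at its last offset
    have hq : (t ++ [a]) ≠ [] := by simp
    have rhs_eq : rotCount (a :: t) (x :: xs) =
        (if x = a then 1 else 0) + sumJ xs (t ++ [a]) := by
      rw [rotCount]
      simp only [List.headD_cons, List.tail_cons, List.take_succ_cons, List.take_zero]
      rw [ih (t ++ [a]) hq]
      rfl
    rw [lhs_eq, rhs_eq]
    have hsplit : sumJ xs (t ++ [a]) =
        ((List.range t.length).map (fun j => cJ xs j (t.length + 1) (t.getD j 0))).sum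
          + cJ xs t.length (t.length + 1) a := by
      simp only [sumJ, List.length_append, List.length_cons, List.length_nil, Nat.zero_add]
      rw [List.range_succ, List.map_append, List.sum_append]
      have h1 : (List.range t.length).map (fun j => cJ xs j (t.length + 1) ((t ++ [a]).getD j 0))
          = (List.range t.length).map (fun j => cJ xs j (t.length + 1) (t.getD j 0)) := by
        apply List.map_congr_left
        intro j hj
        rw [List.getD_append _ _ _ _ (List.mem_range.mp hj)]
      have h2 : (t ++ [a]).getD t.length 0 = a := by
        rw [List.getD_eq_getElem?_getD, List.getElem?_append_right (le_refl _)]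
        simp
      rw [h1]
      simp only [List.map_cons, List.map_nil, List.sum_cons, List.sum_nil, h2, add_zero]
    rw [hsplit]
    ring

-- max? of a 3-element list is the nested max
theorem hmax3 (x y z : Int) : ((PySem.List.max? [x, y, z] (fun v => v)).getD 0) = max (max x y) z := by
  by_cases h1 : x < y <;> by_cases h2 : y < z <;> by_cases h3 : x < z <;>
    simp [PySem.List.max?, h1, h2, h3] <;> omega

-- patScore = sumJ on each of the three literal patterns (both sides evaluate to the same five/eight/ten stride counts)
theorem patScore_one (xs : List Int) : patScore xs [1,2,3,4,5] = sumJ xs [1,2,3,4,5] := by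
  simp [patScore, sumJ, cJ, PySem.List.enumerate_cons, PySem.List.enumerate_nil, List.range_succ]

theorem patScore_two (xs : List Int) : patScore xs [2,1,2,3,2,4,2,5] = sumJ xs [2,1,2,3,2,4,2,5] := by
  simp [patScore, sumJ, cJ, PySem.List.enumerate_cons, PySem.List.enumerate_nil, List.range_succ]

theorem patScore_three (xs : List Int) :
    patScore xs [3,3,1,1,2,2,4,4,5,5] = sumJ xs [3,3,1,1,2,2,4,4,5,5] := by
  simp [patScore, sumJ, cJ, PySem.List.enumerate_cons, PySem.List.enumerate_nil, List.range_succ]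

theorem solution_spec' (answers : List Int) : solution answers = solution_alt answers := by
  have hA1 : cnt [1,2,3,4,5] 5 (PySem.List.enumerate answers 0) = rotCount [1,2,3,4,5] answers := by
    have h := cnt_rot answers 0 [1,2,3,4,5] (by simp)
    norm_num at h
    exact h
  have hA2 : cnt [2,1,2,3,2,4,2,5] 8 (PySem.List.enumerate answers 0)
      = rotCount [2,1,2,3,2,4,2,5] answers := by
    have h := cnt_rot answers 0 [2,1,2,3,2,4,2,5] (by simp)
    norm_num at h
    exact h
  have hA3 : cnt [3,3,1,1,2,2,4,4,5,5] 10 (PySem.List.enumerate answers 0)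
      = rotCount [3,3,1,1,2,2,4,4,5,5] answers := by
    have h := cnt_rot answers 0 [3,3,1,1,2,2,4,4,5,5] (by simp)
    norm_num at h
    exact h
  have hB1 : patScore answers [1,2,3,4,5] = rotCount [1,2,3,4,5] answers := by
    rw [patScore_one, sumJ_rot answers _ (by simp)]
  have hB2 : patScore answers [2,1,2,3,2,4,2,5] = rotCount [2,1,2,3,2,4,2,5] answers := by
    rw [patScore_two, sumJ_rot answers _ (by simp)]
  have hB3 : patScore answers [3,3,1,1,2,2,4,4,5,5] = rotCount [3,3,1,1,2,2,4,4,5,5] answers := by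
    rw [patScore_three, sumJ_rot answers _ (by simp)]
  simp only [solution, solution_alt, foldl_aStep, List.map_cons, List.map_nil, zero_add,
    hA1, hA2, hA3, hB1, hB2, hB3, hmax3]
  set a := rotCount [1,2,3,4,5] answers
  set b := rotCount [2,1,2,3,2,4,2,5] answers
  set c := rotCount [3,3,1,1,2,2,4,4,5,5] answers
  set M := max (max a b) c with hM
  by_cases h1 : a = M <;> by_cases h2 : b = M <;> by_cases h3 : c = M <;>
    (simp [List.zip, h1, h2, h3]; try decide)

-- ===== VERDICT (by name: the statement is the Claim_ definition above) =====
theorem solution_spec : Claim_equal_solution := by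
  intro answers _
  exact solution_spec' answers
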